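-- pv_equiv track=rewrite | github.com/gypsy5oul/apex-scanner | app/app/remediation.py | _group_by_package
-- ===== SOURCE A (Python) =====
-- from typing import Dict, Any, List, Optional, Tuple
-- from collections import defaultdict
--
-- def _group_by_package(vulnerabilities: List[Dict[str, Any]]) -> Dict[str, List[Dict]]:
--     """Group vulnerabilities by package name and version"""
--     grouped = defaultdict(list)
--     for vuln in vulnerabilities:
--         pkg_name = vuln.get("package_name") or vuln.get("package", "unknown")
--         pkg_version = vuln.get("package_version") or vuln.get("version", "unknown")
--         pkg_type = vuln.get("package_type") or vuln.get("type", "unknown")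
--         key = f"{pkg_type}:{pkg_name}:{pkg_version}"
--         grouped[key].append(vuln)
--     return grouped
-- ===== SOURCE B (Python) =====
-- from typing import Dict, Any, List
-- from collections import defaultdict
--
-- def _group_by_package(vulnerabilities: List[Dict[str, Any]]) -> Dict[str, List[Dict]]:
--     """Group vulnerabilities by package name and version (key-list + filter pass)."""
--     def keyfn(v):
--         pkg_name = v.get("package_name") or v.get("package", "unknown")
--         pkg_version = v.get("package_version") or v.get("version", "unknown")
--         pkg_type = v.get("package_type") or v.get("type", "unknown")
--         return f"{pkg_type}:{pkg_name}:{pkg_version}"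
--     tagged = [(keyfn(v), v) for v in vulnerabilities]
--     keys = []
--     for k, _ in tagged:
--         if k not in keys:
--             keys.append(k)
--     return defaultdict(list, {k: [v for k2, v in tagged if k2 == k] for k in keys})
-- ===== Notes on version B (the rewrite author's own statement) =====
-- stated objective: alternative
-- what changed: Replaces A's single incremental defaultdict-append pass by a three-stage pipeline: tag every vuln with its key once, dedup the keys in first-occurrence order, then build each group by filtering the tagged list per key.
import Mathlib
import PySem

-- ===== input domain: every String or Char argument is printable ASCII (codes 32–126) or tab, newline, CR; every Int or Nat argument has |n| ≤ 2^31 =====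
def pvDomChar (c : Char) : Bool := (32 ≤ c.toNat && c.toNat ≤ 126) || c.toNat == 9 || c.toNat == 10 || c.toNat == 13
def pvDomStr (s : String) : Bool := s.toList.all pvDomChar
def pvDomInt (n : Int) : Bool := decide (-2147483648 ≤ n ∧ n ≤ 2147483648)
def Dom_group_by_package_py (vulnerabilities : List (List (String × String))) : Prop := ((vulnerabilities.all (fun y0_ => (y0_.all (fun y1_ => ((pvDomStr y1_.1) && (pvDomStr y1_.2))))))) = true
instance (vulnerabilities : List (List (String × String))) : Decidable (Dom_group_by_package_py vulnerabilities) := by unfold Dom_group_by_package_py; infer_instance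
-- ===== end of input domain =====

-- B replaces A's incremental defaultdict pass by a key-tagging pass, an ordered key dedup and a
-- per-key filter (objective: alternative decomposition, same results, no speed claim).


-- ===== PORT A =====
-- vuln.get(k1) or vuln.get(k2, "unknown"): the left operand is falsy exactly when it is None or ""
def pvOrGet (d : PySem.Dict String String) (k1 k2 : String) : String :=
  match d.get? k1 with
  | some s => if s = "" then d.getD k2 "unknown" else s
  | none => d.getD k2 "unknown"

-- each inner association list is read as the Python dict it denotes (last value wins on a
-- duplicated key), exactly PySem.Dict.ofList; the stored vuln is that dict's item list
def group_by_package_py (vulnerabilities : List (List (String × String))) : List (String × List (List (String × String))) :=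
  (vulnerabilities.foldl
    (fun grouped vuln =>
      let d := PySem.Dict.ofList vuln
      let pkg_name := pvOrGet d "package_name" "package"
      let pkg_version := pvOrGet d "package_version" "version"
      let pkg_type := pvOrGet d "package_type" "type"
      let key := pkg_type ++ ":" ++ pkg_name ++ ":" ++ pkg_version
      grouped.modify key [] (fun l => l ++ [d.items]))
    PySem.Dict.empty).items

-- ===== PORT B =====
def pvKeyfn (d : PySem.Dict String String) : String :=
  let pkg_name := pvOrGet d "package_name" "package"
  let pkg_version := pvOrGet d "package_version" "version"
  let pkg_type := pvOrGet d "package_type" "type"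
  pkg_type ++ ":" ++ pkg_name ++ ":" ++ pkg_version

def group_by_package_py_alt (vulnerabilities : List (List (String × String))) : List (String × List (List (String × String))) :=
  let tagged := vulnerabilities.map (fun v =>
    let d := PySem.Dict.ofList v
    (pvKeyfn d, d.items))
  let keys := PySem.Set.ofList (tagged.map (·.1))
  keys.map (fun k => (k, (tagged.filter (fun p => p.1 == k)).map (·.2)))

-- ===== PRECONDITION & SPEC =====
def Spec_group_by_package_py (vulnerabilities : List (List (String × String))) (out : List (String × List (List (String × String)))) : Prop := out = group_by_package_py_alt vulnerabilities
instance (vulnerabilities : List (List (String × String))) (out : List (String × List (List (String × String)))) : Decidable (Spec_group_by_package_py vulnerabilities out) := by unfold Spec_group_by_package_py; infer_instance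

-- ===== CLAIM (what is proved, stated in full; the proofs are below) =====
def Claim_equal_group_by_package_py : Prop := ∀ (vulnerabilities : List (List (String × String))), Dom_group_by_package_py vulnerabilities → Spec_group_by_package_py vulnerabilities (group_by_package_py vulnerabilities)

-- ===== LEMMAS AND PROOFS =====

-- ===== VERDICT (by name: the statement is the Claim_ definition above) =====
theorem group_by_package_py_spec : Claim_equal_group_by_package_py := by
  intro vulns _
  unfold Spec_group_by_package_py
  have hA : group_by_package_py vulns =
      ((vulns.map fun v => (pvKeyfn (PySem.Dict.ofList v), (PySem.Dict.ofList v).items)).foldl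
        (fun g p => g.modify p.1 [] (fun l => l ++ [p.2])) PySem.Dict.empty).items := by
    rw [List.foldl_map]
    rfl
  rw [hA]
  set tagged := vulns.map fun v => (pvKeyfn (PySem.Dict.ofList v), (PySem.Dict.ofList v).items)
  rw [PySem.Dict.items_eq_map_keys _
      (PySem.Dict.nodup_keys_foldl_modify_key tagged Prod.fst [] (fun _ p l => l ++ [p.2]) _
        PySem.Dict.nodup_keys_empty) []]
  rw [PySem.Dict.keys_foldl_modify_key tagged Prod.fst [] (fun _ p l => l ++ [p.2])]
  simp only [PySem.Dict.getD_foldl_modify_append, PySem.Dict.getD_empty, List.nil_append,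
    PySem.Dict.keys_empty]
  rfl
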